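-- pv_equiv track=rewrite | github.com/christiankopac/kopac-ch | scripts/convert_content.py | convert_front_matter
-- ===== SOURCE A (Python) =====
-- def convert_front_matter(content):
--     """Convert TOML front matter from Zola to Hugo format."""
--     lines = content.split('\n')
--     if not (lines[0].strip() == '+++'):
--         return content
--
--     # Find the closing +++
--     end_idx = None
--     for i in range(1, len(lines)):
--         if lines[i].strip() == '+++':
--             end_idx = i
--             break
--
--     if end_idx is None:
--         return content
--
--     # Process front matter
--     front_matter = lines[1:end_idx]
--     body = '\n'.join(lines[end_idx+1:])
--
--     new_front_matter = []
--     in_extra = False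
--     extra_indent = 0
--
--     for line in front_matter:
--         stripped = line.strip()
--
--         # Skip [extra] line
--         if stripped == '[extra]':
--             in_extra = True
--             # Calculate indent level for extra content
--             extra_indent = len(line) - len(line.lstrip())
--             continue
--
--         # Check if we're leaving extra section (new section starts)
--         if in_extra and line and not line[0].isspace() and '[' in line:
--             in_extra = False
--
--         # If we're in extra, remove the indent
--         if in_extra and line.startswith(' ' * (extra_indent + 2)):
--             # Remove extra indent (typically 2 spaces)
--             new_front_matter.append(line[2:])
--         elif not in_extra:
--             new_front_matter.append(line)
--         else:
--             new_front_matter.append(line)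
--
--     return '+++\n' + '\n'.join(new_front_matter) + '\n+++\n' + body
-- ===== SOURCE B (Python) =====
-- def convert_front_matter(content):
--     """Convert TOML front matter from Zola to Hugo format."""
--     lines = content.split('\n')
--     stripped = [ln.strip() for ln in lines]
--     if stripped[0] != '+++':
--         return content
--     if '+++' not in stripped[1:]:
--         return content
--     end_idx = stripped.index('+++', 1)
--
--     fm = lines[1:end_idx]
--     body = '\n'.join(lines[end_idx + 1:])
--
--     # Pass 1: mark each front-matter line.
--     # None        -> outside any [extra] region: keep verbatim
--     # 'drop'      -> an [extra] header line: omit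
--     # int indent  -> inside an [extra] region whose header had that indent
--     marks = [None] * len(fm)
--     i = 0
--     while i < len(fm):
--         if fm[i].strip() == '[extra]':
--             marks[i] = 'drop'
--             indent = len(fm[i]) - len(fm[i].lstrip())
--             j = i + 1
--             while j < len(fm):
--                 ln = fm[j]
--                 if ln.strip() == '[extra]':
--                     break
--                 if ln and not ln[0].isspace() and '[' in ln:
--                     break
--                 marks[j] = indent
--                 j += 1
--             i = j
--         else:
--             i += 1
--
--     # Pass 2: render.
--     out = []
--     for ln, m in zip(fm, marks):
--         if m == 'drop':
--             continue
--         if m is not None and ln.startswith(' ' * (m + 2)):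
--             out.append(ln[2:])
--         else:
--             out.append(ln)
--     return '+++\n' + '\n'.join(out) + '\n+++\n' + body
-- ===== Notes on version B (the rewrite author's own statement) =====
-- stated objective: alternative
-- what changed: A converts in one stateful pass toggling an in_extra flag and extra_indent per line; B first locates the closing delimiter via an index over pre-stripped lines, then marks every front-matter line (outside / extra-header / inside-with-indent) by scanning region boundaries, and renders the output in a separate second pass.
import Mathlib
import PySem

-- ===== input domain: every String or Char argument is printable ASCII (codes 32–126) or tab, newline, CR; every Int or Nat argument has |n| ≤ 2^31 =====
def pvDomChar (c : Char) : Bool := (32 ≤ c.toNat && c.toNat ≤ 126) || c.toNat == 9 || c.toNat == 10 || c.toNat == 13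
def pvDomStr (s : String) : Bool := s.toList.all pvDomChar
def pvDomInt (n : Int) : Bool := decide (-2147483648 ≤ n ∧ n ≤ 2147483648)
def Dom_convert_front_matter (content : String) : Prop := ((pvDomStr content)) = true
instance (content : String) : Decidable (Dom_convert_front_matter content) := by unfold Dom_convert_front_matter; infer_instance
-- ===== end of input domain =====

-- B replaces A's single stateful loop (in_extra flag toggled line by line) with two passes:
-- first mark every front-matter line (outside / [extra] header / inside-with-indent), then render.
-- Objective: alternative decomposition, same cost; equivalence of return values proved below.

-- ===== PORT A =====

-- 'line and not line[0].isspace() and "[" in line'  (the "leaving [extra]" test)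
def pvLeaving (line : String) : Bool :=
  decide (line.toList ≠ []) && !(PySem.Chars.isspace (line.toList.headD ' ')) && PySem.Str.isIn "[" line

-- 'len(line) - len(line.lstrip())'  (indent of the [extra] header)
def pvIndent (line : String) : Nat :=
  (PySem.Str.len line - PySem.Str.len (PySem.Str.lstrip line)).toNat

-- 'for i in range(1, len(lines)): if lines[i].strip() == '+++': end_idx = i; break'
-- (scan carried as the suffix lines[i:] together with the index i)
def pvA_findEnd : List String → Nat → Option Nat
  | [], _ => none
  | l :: ls, i => if PySem.Str.strip l = "+++" then some i else pvA_findEnd ls (i + 1)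

-- the body of A's 'for line in front_matter' loop; state = (in_extra, extra_indent, new_front_matter)
def pvA_step (st : Bool × Nat × List String) (line : String) : Bool × Nat × List String :=
  let stripped := PySem.Str.strip line
  if stripped = "[extra]" then
    (true, pvIndent line, st.2.2)
  else
    let inExtra := if st.1 && pvLeaving line then false else st.1
    if inExtra && PySem.Str.startswith line (String.mk (List.replicate (st.2.1 + 2) ' ')) then
      (inExtra, st.2.1, st.2.2 ++ [PySem.Str.slice line (some 2) none])
    else if !inExtra then
      (inExtra, st.2.1, st.2.2 ++ [line])
    else
      (inExtra, st.2.1, st.2.2 ++ [line])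

def convert_front_matter (content : String) : String :=
  let lines := (PySem.Str.split? content "\n").getD []
  if ¬ (PySem.Str.strip (lines.headD "") = "+++") then content
  else
    match pvA_findEnd (lines.drop 1) 1 with
    | none => content
    | some endIdx =>
      let frontMatter := PySem.List.slice lines (some 1) (some (endIdx : Int))
      let body := PySem.Str.join "\n" (PySem.List.slice lines (some ((endIdx : Int) + 1)) none)
      let res := frontMatter.foldl pvA_step (false, 0, ([] : List String))
      "+++\n" ++ PySem.Str.join "\n" res.2.2 ++ "\n+++\n" ++ body

-- ===== PORT B =====

-- mark of a front-matter line: outside any [extra] region / an [extra] header / inside with header indent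
inductive PvMark : Type
  | keep : PvMark
  | drop : PvMark
  | ded : Nat → PvMark
deriving DecidableEq, Repr

-- pass 1: the outer while (scanning outside a region) and the inner while (scanning inside one)
mutual
def pvB_markOut : List String → List PvMark
  | [] => []
  | l :: ls =>
    if PySem.Str.strip l = "[extra]" then
      PvMark.drop :: pvB_markIn (pvIndent l) ls
    else
      PvMark.keep :: pvB_markOut ls
  termination_by ls => (ls.length, 0)
def pvB_markIn (ind : Nat) : List String → List PvMark
  | [] => []
  | l :: ls =>
    if PySem.Str.strip l = "[extra]" then pvB_markOut (l :: ls)      -- first break: new region starts here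
    else if pvLeaving l then pvB_markOut (l :: ls)                   -- second break: section line ends region
    else PvMark.ded ind :: pvB_markIn ind ls
  termination_by ls => (ls.length, 1)
end

-- pass 2: render the zipped (line, mark) list
def pvB_render : List (String × PvMark) → List String
  | [] => []
  | (l, m) :: rest =>
    match m with
    | PvMark.drop => pvB_render rest
    | PvMark.ded ind =>
      (if PySem.Str.startswith l (String.mk (List.replicate (ind + 2) ' ')) then
        PySem.Str.slice l (some 2) none
      else l) :: pvB_render rest
    | PvMark.keep => l :: pvB_render rest

def convert_front_matter_alt (content : String) : String :=
  let lines := (PySem.Str.split? content "\n").getD []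
  let stripped := lines.map PySem.Str.strip
  if stripped.headD "" ≠ "+++" then content
  else if ¬ ((PySem.List.slice stripped (some 1) none).contains "+++") then content
  else
    match PySem.List.index? (PySem.List.slice stripped (some 1) none) "+++" with
    | none => content      -- unreachable: membership was just checked
    | some k =>
      let endIdx := k + 1
      let fm := PySem.List.slice lines (some 1) (some (endIdx : Int))
      let body := PySem.Str.join "\n" (PySem.List.slice lines (some ((endIdx : Int) + 1)) none)
      let out := pvB_render (fm.zip (pvB_markOut fm))
      "+++\n" ++ PySem.Str.join "\n" out ++ "\n+++\n" ++ body

-- ===== PRECONDITION & SPEC =====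
def Spec_convert_front_matter (content : String) (out : String) : Prop := out = convert_front_matter_alt content
instance (content : String) (out : String) : Decidable (Spec_convert_front_matter content out) := by unfold Spec_convert_front_matter; infer_instance

-- ===== CLAIM (what is proved, stated in full; the proofs are below) =====
def Claim_equal_convert_front_matter : Prop := ∀ (content : String), Dom_convert_front_matter content → Spec_convert_front_matter content (convert_front_matter content)

-- ===== LEMMAS AND PROOFS =====

theorem pvFindEnd_eq (ls : List String) (i : Nat) :
    pvA_findEnd ls i = (PySem.List.index? (ls.map PySem.Str.strip) "+++").map (· + i) := by
  induction ls generalizing i with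
  | nil => simp [pvA_findEnd, PySem.List.index?]
  | cons l ls ih =>
    by_cases h : PySem.Str.strip l = "+++"
    · simp [pvA_findEnd, PySem.List.index?, List.idxOf?_cons, h]
    · rw [pvA_findEnd, if_neg h, ih (i + 1)]
      simp only [PySem.List.index?, List.map_cons, List.idxOf?_cons]
      have h' : ¬ (PySem.Str.strip l == "+++") = true := by simpa using h
      rw [if_neg h']
      cases List.idxOf? "+++" (ls.map PySem.Str.strip) <;> (simp; try omega)

theorem pvLoop_eq (fm : List String) :
    (∀ (ind : Nat) (acc : List String),
      ((fm.foldl pvA_step (false, ind, acc)).2.2 : List String)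
        = acc ++ pvB_render (fm.zip (pvB_markOut fm))) ∧
    (∀ (ind : Nat) (acc : List String),
      ((fm.foldl pvA_step (true, ind, acc)).2.2 : List String)
        = acc ++ pvB_render (fm.zip (pvB_markIn ind fm))) := by
  induction fm with
  | nil => simp [pvB_markOut, pvB_markIn, pvB_render]
  | cons l ls ih =>
    constructor
    · intro ind acc
      by_cases hx : PySem.Str.strip l = "[extra]"
      · simp [pvA_step, pvB_markOut, pvB_render, hx, ih.2]
      · simp [pvA_step, pvB_markOut, pvB_render, hx, ih.1]
    · intro ind acc
      by_cases hx : PySem.Str.strip l = "[extra]"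
      · simp [pvA_step, pvB_markIn, pvB_markOut, pvB_render, hx, ih.2]
      · by_cases hl : pvLeaving l = true
        · simp [pvA_step, pvB_markIn, pvB_markOut, pvB_render, hx, hl, ih.1]
        · simp only [pvB_markIn, hx, hl, if_neg hx, if_false, List.foldl_cons,
            List.zip_cons_cons]
          simp [pvA_step, hx, hl]
          split <;> rename_i hs <;> simp [pvB_render, hs, ih.2]

-- ===== VERDICT (by name: the statement is the Claim_ definition above) =====
theorem convert_front_matter_spec : Claim_equal_convert_front_matter := by
  intro content _
  unfold Spec_convert_front_matter convert_front_matter convert_front_matter_alt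
  cases hl : (PySem.Str.split? content "\n").getD [] with
  | nil =>
    simp
    exact fun h => absurd h (by decide)
  | cons a rest =>
    simp only [List.headD_cons, List.map_cons, List.drop_succ_cons, List.drop_zero]
    by_cases h0 : PySem.Str.strip a = "+++"
    · rw [pvFindEnd_eq]
      have hslice : PySem.List.slice ("+++" :: rest.map PySem.Str.strip) (some 1) none
          = rest.map PySem.Str.strip := by
        rw [PySem.List.slice_from _ (by norm_num)]; norm_num
      simp only [h0, hslice, ite_not]
      cases hidx : PySem.List.index? (rest.map PySem.Str.strip) "+++" with
      | none =>
        have hnm : "+++" ∉ rest.map PySem.Str.strip := by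
          intro hmem
          have hs : (List.idxOf? "+++" (rest.map PySem.Str.strip)).isSome := by
            simp [List.isSome_idxOf?, hmem]
          simp only [PySem.List.index?] at hidx
          rw [hidx] at hs
          simp at hs
        simp [hnm]
      | some k =>
        have hmem : "+++" ∈ rest.map PySem.Str.strip := by
          have hs : (List.idxOf? "+++" (rest.map PySem.Str.strip)).isSome := by
            simp only [PySem.List.index?] at hidx
            simp [hidx]
          simpa [List.isSome_idxOf?] using hs
        have hloop := (pvLoop_eq (PySem.List.slice (a :: rest) (some 1) (some ((k : Int) + 1)))).1 0 []
        simp only [List.nil_append] at hloop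
        simp [hmem, hloop, Nat.cast_add, Nat.cast_one]
    · simp [h0]
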